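-- pv_equiv track=rewrite | github.com/DhruvTilva/swarm | core/file_writer.py | _ensure_ui_requirements
-- ===== SOURCE A (Python) =====
-- def _ensure_ui_requirements(requirements_txt: str) -> str:
--     content = requirements_txt.strip()
--     lines = [line.strip() for line in content.splitlines() if line.strip()]
--     normalized = [line.lower() for line in lines]
--
--     if not any(line.startswith("jinja2") for line in normalized):
--         lines.append("jinja2==3.1.4")
--
--     if not any(line.startswith("fastapi") for line in normalized):
--         lines.append("fastapi==0.115.8")
--
--     if not any(line.startswith("uvicorn") for line in normalized):
--         lines.append("uvicorn==0.34.0")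
--
--     return "\n".join(lines) + "\n"
-- ===== SOURCE B (Python) =====
-- def _ensure_ui_requirements(requirements_txt: str) -> str:
--     def walk(raw, j, f, u):
--         # Single fused recursive pass: strip/filter/check in one go, output built
--         # front-to-back; the missing default entries are emitted at the base case.
--         if not raw:
--             tail = []
--             if not j:
--                 tail.append("jinja2==3.1.4")
--             if not f:
--                 tail.append("fastapi==0.115.8")
--             if not u:
--                 tail.append("uvicorn==0.34.0")
--             return tail
--         line = raw[0].strip()
--         if not line:
--             return walk(raw[1:], j, f, u)
--         low = line.lower()
--         return [line] + walk(raw[1:],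
--                              j or low.startswith("jinja2"),
--                              f or low.startswith("fastapi"),
--                              u or low.startswith("uvicorn"))
--     return "\n".join(walk(requirements_txt.strip().splitlines(), False, False, False)) + "\n"
-- ===== Notes on version B (the rewrite author's own statement) =====
-- stated objective: alternative
-- what changed: Replaced A's staged passes (strip/filter comprehension, lowercase map, three separate any-scans, three appends) by one fused structural recursion over the raw split lines that strips, filters and checks the three prefixes in the same pass, threading three found-flags and emitting the missing default entries at the recursion's base case while the output list is built front-to-back.
import Mathlib
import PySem

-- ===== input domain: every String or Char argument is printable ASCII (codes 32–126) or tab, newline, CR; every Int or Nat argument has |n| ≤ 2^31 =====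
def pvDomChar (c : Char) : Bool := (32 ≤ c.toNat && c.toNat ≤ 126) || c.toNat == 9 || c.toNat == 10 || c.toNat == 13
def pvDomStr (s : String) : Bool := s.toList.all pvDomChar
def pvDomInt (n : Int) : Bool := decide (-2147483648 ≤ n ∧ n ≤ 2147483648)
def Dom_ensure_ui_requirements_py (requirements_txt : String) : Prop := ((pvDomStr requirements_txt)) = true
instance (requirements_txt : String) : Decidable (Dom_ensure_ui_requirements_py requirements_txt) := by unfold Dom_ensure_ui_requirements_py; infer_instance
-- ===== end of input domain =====

-- B fuses A's staged passes (strip/filter, lowercase map, three any-scans, appends) into one recursive pass threading three found-flags; alternative decomposition, same cost class.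


-- ===== PORT A =====
def ensure_ui_requirements_py (requirements_txt : String) : String :=
  let content := PySem.Str.strip requirements_txt
  let lines := ((PySem.Str.splitlines content).filter
      (fun line => PySem.Str.strip line != "")).map (fun line => PySem.Str.strip line)
  let normalized := lines.map (fun line => PySem.Str.lower line)
  let lines := if !(normalized.any (fun line => PySem.Str.startswith line "jinja2")) then
      lines ++ ["jinja2==3.1.4"] else lines
  let lines := if !(normalized.any (fun line => PySem.Str.startswith line "fastapi")) then
      lines ++ ["fastapi==0.115.8"] else lines
  let lines := if !(normalized.any (fun line => PySem.Str.startswith line "uvicorn")) then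
      lines ++ ["uvicorn==0.34.0"] else lines
  PySem.Str.join "\n" lines ++ "\n"

-- ===== PORT B =====
-- B's inner 'walk': one fused recursive pass over the raw split lines
def pvWalk : List String → Bool → Bool → Bool → List String
  | [], j, f, u =>
      (if !j then ["jinja2==3.1.4"] else []) ++
      (if !f then ["fastapi==0.115.8"] else []) ++
      (if !u then ["uvicorn==0.34.0"] else [])
  | r :: rest, j, f, u =>
      let line := PySem.Str.strip r
      if line == "" then pvWalk rest j f u
      else
        let low := PySem.Str.lower line
        line :: pvWalk rest
            (j || PySem.Str.startswith low "jinja2")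
            (f || PySem.Str.startswith low "fastapi")
            (u || PySem.Str.startswith low "uvicorn")

def ensure_ui_requirements_py_alt (requirements_txt : String) : String :=
  PySem.Str.join "\n"
    (pvWalk (PySem.Str.splitlines (PySem.Str.strip requirements_txt)) false false false) ++ "\n"

-- ===== PRECONDITION & SPEC =====
def Spec_ensure_ui_requirements_py (requirements_txt : String) (out : String) : Prop := out = ensure_ui_requirements_py_alt requirements_txt
instance (requirements_txt : String) (out : String) : Decidable (Spec_ensure_ui_requirements_py requirements_txt out) := by unfold Spec_ensure_ui_requirements_py; infer_instance

-- ===== CLAIM (what is proved, stated in full; the proofs are below) =====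
def Claim_equal_ensure_ui_requirements_py : Prop := ∀ (requirements_txt : String), Dom_ensure_ui_requirements_py requirements_txt → Spec_ensure_ui_requirements_py requirements_txt (ensure_ui_requirements_py requirements_txt)

-- ===== LEMMAS AND PROOFS =====

-- the tail B emits at its base case, phrased over the filtered stripped lines
def pvTail (j f u : Bool) (L : List String) : List String :=
  (if !(j || L.any (fun l => PySem.Str.startswith (PySem.Str.lower l) "jinja2")) then ["jinja2==3.1.4"] else []) ++
  (if !(f || L.any (fun l => PySem.Str.startswith (PySem.Str.lower l) "fastapi")) then ["fastapi==0.115.8"] else []) ++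
  (if !(u || L.any (fun l => PySem.Str.startswith (PySem.Str.lower l) "uvicorn")) then ["uvicorn==0.34.0"] else [])

-- characterisation of B's fused pass: filtered stripped lines followed by the missing entries
theorem pvWalk_eq (raw : List String) (j f u : Bool) :
    pvWalk raw j f u =
      ((raw.filter (fun l => PySem.Str.strip l != "")).map (fun l => PySem.Str.strip l)) ++
        pvTail j f u ((raw.filter (fun l => PySem.Str.strip l != "")).map (fun l => PySem.Str.strip l)) := by
  induction raw generalizing j f u with
  | nil => simp [pvWalk, pvTail]
  | cons r rest ih =>
    by_cases h : PySem.Str.strip r = ""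
    · simp [pvWalk, h, List.filter, ih]
    · have h' : (PySem.Str.strip r != "") = true := by simp [h]
      simp only [pvWalk, List.filter_cons, h', if_pos, List.map_cons, List.cons_append]
      rw [if_neg (by simp [h]), ih]
      simp [pvTail, List.any_cons, Bool.or_assoc]

-- ===== VERDICT (by name: the statement is the Claim_ definition above) =====
theorem ensure_ui_requirements_py_spec : Claim_equal_ensure_ui_requirements_py := by
  unfold Claim_equal_ensure_ui_requirements_py
  intro s _
  unfold Spec_ensure_ui_requirements_py ensure_ui_requirements_py ensure_ui_requirements_py_alt
  simp only
  rw [pvWalk_eq]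
  set L := ((PySem.Str.splitlines (PySem.Str.strip s)).filter
      (fun line => PySem.Str.strip line != "")).map (fun line => PySem.Str.strip line) with hL
  have hany : ∀ p, (L.map (fun line => PySem.Str.lower line)).any
      (fun line => PySem.Str.startswith line p) =
      L.any (fun l => PySem.Str.startswith (PySem.Str.lower l) p) := by
    intro p; rw [List.any_map]; rfl
  simp only [hany, pvTail, Bool.false_or]
  cases h1 : L.any (fun l => PySem.Str.startswith (PySem.Str.lower l) "jinja2") <;>
  cases h2 : L.any (fun l => PySem.Str.startswith (PySem.Str.lower l) "fastapi") <;>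
  cases h3 : L.any (fun l => PySem.Str.startswith (PySem.Str.lower l) "uvicorn") <;>
    simp
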